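-- pv_equiv track=rewrite | github.com/SandipKumar05/Algorithm-and-Data-Structure | python/toptal/split_array.py | find_index_with_equal_counts
-- ===== SOURCE A (Python) =====
-- def find_index_with_equal_counts(X, A):
--     count_equal_to_X = 0
--     count_different_from_X = len(A)-A.count(X)
--     for K in range(len(A)):
--         if A[K] == X:
--             count_equal_to_X += 1
--         else:
--             count_different_from_X -= 1
--         if count_equal_to_X == count_different_from_X:
--             return K
--     return -1
-- ===== SOURCE B (Python) =====
-- def find_index_with_equal_counts(X, A):
--     # The loop's condition is content-independent: it fires exactly at
--     # K = len(A) - A.count(X) - 1, which is -1 when no element differs from X.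
--     return len(A) - A.count(X) - 1
-- ===== Notes on version B (the rewrite author's own statement) =====
-- stated objective: simpler
-- what changed: Replaced the prefix-counting scan with the closed form len(A) - A.count(X) - 1, since the loop's equality condition holds exactly at that index (or never, yielding -1).
import Mathlib
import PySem

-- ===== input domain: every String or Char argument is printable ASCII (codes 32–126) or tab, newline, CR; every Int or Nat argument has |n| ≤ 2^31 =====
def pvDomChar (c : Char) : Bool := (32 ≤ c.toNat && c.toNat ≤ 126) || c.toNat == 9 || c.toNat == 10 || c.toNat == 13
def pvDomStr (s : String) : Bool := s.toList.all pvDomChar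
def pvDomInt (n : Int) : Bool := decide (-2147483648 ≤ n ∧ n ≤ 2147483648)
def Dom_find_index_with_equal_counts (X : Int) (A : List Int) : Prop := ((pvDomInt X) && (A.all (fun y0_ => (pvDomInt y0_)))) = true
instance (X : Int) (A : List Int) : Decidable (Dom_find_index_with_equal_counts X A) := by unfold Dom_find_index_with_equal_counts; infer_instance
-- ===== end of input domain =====

-- B replaces A's prefix-counting scan with the closed form len(A) - A.count(X) - 1 (simpler).


-- ===== PORT A =====
-- loop of A: K tracks the index, ceq/cdiff the two counters; early return inside
def fiLoop (X : Int) (ceq cdiff K : Int) : List Int → Int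
  | [] => -1
  | a :: rest =>
    let ceq' := if a = X then ceq + 1 else ceq
    let cdiff' := if a = X then cdiff else cdiff - 1
    if ceq' = cdiff' then K else fiLoop X ceq' cdiff' (K + 1) rest

def find_index_with_equal_counts (X : Int) (A : List Int) : Int :=
  fiLoop X 0 ((A.length : Int) - PySem.List.count A X) 0 A

-- ===== PORT B =====
def find_index_with_equal_counts_alt (X : Int) (A : List Int) : Int :=
  (A.length : Int) - PySem.List.count A X - 1

-- ===== PRECONDITION & SPEC =====
def Spec_find_index_with_equal_counts (X : Int) (A : List Int) (out : Int) : Prop := out = find_index_with_equal_counts_alt X A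
instance (X : Int) (A : List Int) (out : Int) : Decidable (Spec_find_index_with_equal_counts X A out) := by unfold Spec_find_index_with_equal_counts; infer_instance

-- ===== CLAIM (what is proved, stated in full; the proofs are below) =====
def Claim_equal_find_index_with_equal_counts : Prop := ∀ (X : Int) (A : List Int), Dom_find_index_with_equal_counts X A → Spec_find_index_with_equal_counts X A (find_index_with_equal_counts X A)

-- ===== LEMMAS AND PROOFS =====

-- Whatever the element, the step decreases cdiff - ceq by one and the return
-- condition fires exactly when cdiff - ceq = 1, so the loop has a closed form.
theorem fiLoop_closed (X : Int) : ∀ (A : List Int) (ceq cdiff K : Int),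
    fiLoop X ceq cdiff K A =
      if 1 ≤ cdiff - ceq ∧ cdiff - ceq ≤ (A.length : Int)
      then K + (cdiff - ceq) - 1 else -1 := by
  intro A
  induction A with
  | nil => intro ceq cdiff K; simp [fiLoop]; omega
  | cons a rest ih =>
    intro ceq cdiff K
    by_cases h : a = X
    · simp only [fiLoop, if_pos h, ih, List.length_cons]
      split_ifs <;> push_cast at * <;> omega
    · simp only [fiLoop, if_neg h, ih, List.length_cons]
      split_ifs <;> push_cast at * <;> omega

theorem count_le_length (A : List Int) (X : Int) :
    PySem.List.count A X ≤ (A.length : Int) := by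
  simp [PySem.List.count_eq]
  exact_mod_cast List.count_le_length

-- ===== VERDICT (by name: the statement is the Claim_ definition above) =====
theorem find_index_with_equal_counts_spec : Claim_equal_find_index_with_equal_counts := by
  intro X A _
  unfold Spec_find_index_with_equal_counts find_index_with_equal_counts
    find_index_with_equal_counts_alt
  rw [fiLoop_closed]
  have h1 : PySem.List.count A X ≤ (A.length : Int) := count_le_length A X
  have h2 : 0 ≤ PySem.List.count A X := by
    simp [PySem.List.count_eq]
  split_ifs with h <;> omega
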